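-- pv_equiv track=rewrite | github.com/kalebmoon07/BN-control-taxonomy | src/bntaxonomy/iface/pyboolnet.py | results_info
-- ===== SOURCE A (Python) =====
-- from typing import List, Optional
--
-- def results_info(list_cs: List[dict]):
--     """
--     Returns a string stating the amount and size of the elements in *list_cs*.
--     **returns**:
--         * *text* (string): text stating the number and size of the elements in *CS*.
--     **example**::
--         >>> results_info([{'v1': 1}, {'v2':0, 'v3':1}])
--     "2 control strategies, 1 of size 1, 1 of size 2"
--     """
--
--     text = str(len(list_cs)) + " control strategies"
--     sizes = [len(x) for x in list_cs]
--     cs_sizes = list({(el, sizes.count(el)) for el in sizes})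
--     cs_sizes.sort()
--     for x in cs_sizes:
--         text = text + ", " + str(x[1]) + " of size " + str(x[0])
--         text = f"{len(list_cs)} control strategies, " + ", ".join(f"{x[1]} of size {x[0]}" for x in cs_sizes)
--     return text
-- ===== SOURCE B (Python) =====
-- def results_info(list_cs):
--     sizes = sorted(len(x) for x in list_cs)
--     parts = []
--     i = 0
--     n = len(sizes)
--     while i < n:
--         v = sizes[i]
--         run = 1
--         while i + run < n and sizes[i + run] == v:
--             run += 1
--         parts.append(str(run) + " of size " + str(v))
--         i += run
--     text = str(len(list_cs)) + " control strategies"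
--     if parts:
--         text = text + ", " + ", ".join(parts)
--     return text
-- ===== Notes on version B (the rewrite author's own statement) =====
-- stated objective: alternative
-- what changed: Instead of counting each size with list.count inside a set comprehension, deduplicating, sorting the pairs and re-joining the whole string on every loop iteration, B sorts the sizes once and emits one part per consecutive run in a single run-length scan.
import Mathlib
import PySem

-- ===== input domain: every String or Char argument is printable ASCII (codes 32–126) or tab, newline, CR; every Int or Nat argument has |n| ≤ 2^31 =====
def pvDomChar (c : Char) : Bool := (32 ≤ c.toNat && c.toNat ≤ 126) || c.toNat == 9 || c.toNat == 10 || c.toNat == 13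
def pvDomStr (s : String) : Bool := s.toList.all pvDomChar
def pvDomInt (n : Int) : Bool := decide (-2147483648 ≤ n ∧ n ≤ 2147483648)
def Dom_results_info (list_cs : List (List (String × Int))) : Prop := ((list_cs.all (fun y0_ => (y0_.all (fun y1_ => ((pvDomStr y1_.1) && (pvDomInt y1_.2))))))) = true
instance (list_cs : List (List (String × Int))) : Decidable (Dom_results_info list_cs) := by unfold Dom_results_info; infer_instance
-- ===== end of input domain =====

-- B sorts the size list once and emits one "count of size s" part per consecutive run in a
-- single run-length scan, instead of A's per-element list.count, set round-trip, sort and a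
-- loop that rebuilds the joined string each iteration (objective: alternative).


-- ===== PORT A =====
-- len(x) on a Python dict argument = number of distinct keys of the assoc list read as a dict
def pyDictLen (x : List (String × Int)) : Int := (PySem.Dict.ofList x).size

def results_info (list_cs : List (List (String × Int))) : String :=
  let text := PySem.Int.toStr (PySem.List.len list_cs) ++ " control strategies"
  let sizes : List Int := list_cs.map (fun x => pyDictLen x)
  -- list({(el, sizes.count(el)) for el in sizes}); the set's hash order is consumed only by .sort()
  let cs_sizes : List (Int × Int) :=
    PySem.List.sorted2
      (PySem.Set.ofList (sizes.map (fun el => (el, (PySem.List.count sizes el : Int)))))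
      Prod.fst Prod.snd
  cs_sizes.foldl (fun text _x =>
    let text := text ++ ", " ++ PySem.Int.toStr _x.2 ++ " of size " ++ PySem.Int.toStr _x.1
    let text := PySem.Int.toStr (PySem.List.len list_cs) ++ " control strategies, " ++
      PySem.Str.join ", " (cs_sizes.map (fun x => PySem.Int.toStr x.2 ++ " of size " ++ PySem.Int.toStr x.1))
    text) text

-- ===== PORT B =====
-- Source B's run-length scan over the sorted sizes: one (value, run length) pair per consecutive run
def groupRuns : List Int → List (Int × Int)
  | [] => []
  | v :: rest =>
    (v, 1 + ((rest.takeWhile (· == v)).length : Int)) :: groupRuns (rest.dropWhile (· == v))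
  termination_by l => l.length
  decreasing_by
    simp only [List.length_cons]
    exact Nat.lt_succ_of_le (List.length_dropWhile_le _ _)

def results_info_alt (list_cs : List (List (String × Int))) : String :=
  let sizes := PySem.List.sorted (list_cs.map (fun x => pyDictLen x)) (fun s => s) false
  let parts := (groupRuns sizes).map (fun g => PySem.Int.toStr g.2 ++ " of size " ++ PySem.Int.toStr g.1)
  let text := PySem.Int.toStr (PySem.List.len list_cs) ++ " control strategies"
  if parts.isEmpty then text else text ++ ", " ++ PySem.Str.join ", " parts

-- ===== PRECONDITION & SPEC =====
def Spec_results_info (list_cs : List (List (String × Int))) (out : String) : Prop := out = results_info_alt list_cs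
instance (list_cs : List (List (String × Int))) (out : String) : Decidable (Spec_results_info list_cs out) := by unfold Spec_results_info; infer_instance

-- ===== CLAIM (what is proved, stated in full; the proofs are below) =====
def Claim_equal_results_info : Prop := ∀ (list_cs : List (List (String × Int))), Dom_results_info list_cs → Spec_results_info list_cs (results_info list_cs)

-- ===== LEMMAS AND PROOFS =====

-- on a sorted list every element surviving dropWhile (== v) is strictly greater than v
theorem dropWhile_gt (v : Int) : ∀ (rest : List Int), (∀ x ∈ rest, v ≤ x) → rest.Pairwise (· ≤ ·) →
    ∀ x ∈ rest.dropWhile (· == v), v < x := by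
  intro rest
  induction rest with
  | nil => intro _ _ x hx; simp at hx
  | cons r rs ih =>
    intro hle hs x hx
    by_cases hr : r = v
    · rw [List.dropWhile_cons_of_pos (by simp [hr])] at hx
      exact ih (fun y hy => hle y (List.mem_cons_of_mem _ hy)) (List.pairwise_cons.mp hs).2 x hx
    · rw [List.dropWhile_cons_of_neg (by simp [hr])] at hx
      have hvr : v < r := lt_of_le_of_ne (hle r (List.mem_cons_self)) (fun h => hr h.symm)
      rcases List.mem_cons.mp hx with h | h
      · omega
      · exact lt_of_lt_of_le hvr ((List.pairwise_cons.mp hs).1 x h)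

-- membership characterisation of the run-length scan on a sorted list
theorem mem_groupRuns : ∀ (l : List Int), l.Pairwise (· ≤ ·) → ∀ p : Int × Int,
    (p ∈ groupRuns l ↔ p.1 ∈ l ∧ p.2 = (l.count p.1 : Int)) := by
  intro l
  induction l using groupRuns.induct with
  | case1 => intro _ p; simp [groupRuns]
  | case2 v rest ih =>
    intro hs p
    have hv : ∀ x ∈ rest, v ≤ x := (List.pairwise_cons.mp hs).1
    have hrest : rest.Pairwise (· ≤ ·) := (List.pairwise_cons.mp hs).2
    have hd : ∀ x ∈ rest.dropWhile (· == v), v < x := dropWhile_gt v rest hv hrest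
    have hdsorted : (rest.dropWhile (· == v)).Pairwise (· ≤ ·) :=
      hrest.sublist (List.dropWhile_sublist _)
    have ht : ∀ x ∈ rest.takeWhile (· == v), x = v := by
      intro x hx
      have := List.mem_takeWhile_imp hx
      simpa using this
    have hvd : v ∉ rest.dropWhile (· == v) := fun h => lt_irrefl v (hd v h)
    have htd : rest.takeWhile (· == v) ++ rest.dropWhile (· == v) = rest :=
      List.takeWhile_append_dropWhile
    have hcount_t : ∀ a, (rest.takeWhile (· == v)).count a = if a = v then (rest.takeWhile (· == v)).length else 0 := by
      intro a
      split_ifs with h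
      · subst h
        refine List.count_eq_length.mpr ?_
        intro b hb
        exact (ht b hb).symm
      · refine List.count_eq_zero.mpr ?_
        intro hmem
        exact h (ht a hmem)
    have hcount : ∀ a, rest.count a = (if a = v then (rest.takeWhile (· == v)).length else 0) + (rest.dropWhile (· == v)).count a := by
      intro a
      rw [← htd, List.count_append, hcount_t]
      simp [htd]
    rw [groupRuns]
    constructor
    · intro hp
      rcases List.mem_cons.mp hp with h | h
      · subst h
        refine ⟨List.mem_cons_self, ?_⟩
        have hcv : List.count v (v :: rest) = 1 + (rest.takeWhile (· == v)).length := by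
          rw [List.count_cons, hcount v, if_pos rfl, List.count_eq_zero.mpr hvd]
          simp
          omega
        simp only [hcv]
        push_cast; ring
      · have := (ih hdsorted p).mp h
        have hp1 : p.1 ∈ rest.dropWhile (· == v) := this.1
        have hne : p.1 ≠ v := fun he => hvd (he ▸ hp1)
        refine ⟨List.mem_cons_of_mem _ ?_, ?_⟩
        · exact (htd ▸ List.mem_append_right _ hp1)
        · have hc : List.count p.1 (v :: rest) = List.count p.1 (List.dropWhile (fun x => x == v) rest) := by
            rw [List.count_cons, hcount p.1, if_neg hne]
            simp
            exact fun h => hne h.symm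
          rw [hc]
          simpa using this.2
    · rintro ⟨hmem, hcnt⟩
      by_cases hp1 : p.1 = v
      · have hcv : List.count p.1 (v :: rest) = 1 + (rest.takeWhile (· == v)).length := by
          rw [hp1, List.count_cons, hcount v, if_pos rfl, List.count_eq_zero.mpr hvd]
          simp
          omega
        exact List.mem_cons.mpr (Or.inl (Prod.ext hp1 (by rw [hcnt, hcv]; push_cast; ring)))
      · right
        refine (ih hdsorted p).mpr ⟨?_, ?_⟩
        · rcases List.mem_cons.mp hmem with h | h
          · exact absurd h hp1
          · rw [← htd] at h
            rcases List.mem_append.mp h with h | h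
            · exact absurd (ht _ h) hp1
            · exact h
        · have hc : List.count p.1 (v :: rest) = List.count p.1 (List.dropWhile (fun x => x == v) rest) := by
            rw [List.count_cons, hcount p.1, if_neg hp1]
            simp
            exact fun h => hp1 h.symm
          rw [hc] at hcnt
          simpa using hcnt

-- the first components of the runs strictly increase on a sorted list
theorem groupRuns_pairwise_fst : ∀ (l : List Int), l.Pairwise (· ≤ ·) →
    (groupRuns l).Pairwise (fun a b => a.1 < b.1) := by
  intro l
  induction l using groupRuns.induct with
  | case1 => intro _; simp [groupRuns]
  | case2 v rest ih =>
    intro hs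
    have hv : ∀ x ∈ rest, v ≤ x := (List.pairwise_cons.mp hs).1
    have hrest : rest.Pairwise (· ≤ ·) := (List.pairwise_cons.mp hs).2
    have hd : ∀ x ∈ rest.dropWhile (· == v), v < x := dropWhile_gt v rest hv hrest
    have hdsorted : (rest.dropWhile (· == v)).Pairwise (· ≤ ·) :=
      hrest.sublist (List.dropWhile_sublist _)
    rw [groupRuns]
    refine List.pairwise_cons.mpr ⟨?_, ih hdsorted⟩
    intro q hq
    exact hd q.1 ((mem_groupRuns _ hdsorted q).mp hq).1

-- Python's tuple sort (sorted2 on fst, snd) is sorted with the lexicographic key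
theorem sorted2_eq_sorted_lex (xs : List (Int × Int)) :
    PySem.List.sorted2 xs Prod.fst Prod.snd false
      = PySem.List.sorted xs (fun p => toLex p) false := by
  have h : (fun (a b : Int × Int) => decide (a.1 < b.1) || (!decide (b.1 < a.1) && decide (a.2 < b.2)))
         = fun (a b : Int × Int) => decide ((fun p => toLex p) a < (fun p => toLex p) b) := by
    funext a b
    by_cases h1 : a.1 < b.1 <;> by_cases h2 : b.1 < a.1 <;> by_cases h3 : a.2 < b.2 <;>
      simp [Prod.Lex.lt_iff, h1, h2, h3] <;> omega
  unfold PySem.List.sorted2 PySem.List.sorted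
  simp only [Bool.false_eq_true, if_false, h]

theorem foldl_const_self {α β : Type} (c : β) : ∀ (l : List α), l.foldl (fun _ _ => c) c = c
  | [] => rfl
  | _ :: l => foldl_const_self c l

-- A's loop overwrites text with the same value each iteration
theorem foldl_const {α β : Type} (c a : β) (l : List α) (h : l ≠ []) :
    l.foldl (fun _ _ => c) a = c := by
  cases l with
  | nil => exact absurd rfl h
  | cons x l => exact foldl_const_self c l

-- A's sorted distinct (size, count) pairs ARE the runs of the sorted size list
theorem groupRuns_eq_sorted2 (szs : List Int) :
    PySem.List.sorted2
        (PySem.Set.ofList (szs.map (fun el => (el, (PySem.List.count szs el : Int)))))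
        Prod.fst Prod.snd false
      = groupRuns (PySem.List.sorted szs (fun s => s) false) := by
  have hsorted : (PySem.List.sorted szs (fun s => s) false).Pairwise (· ≤ ·) := by
    simpa using PySem.List.sorted_pairwise szs (fun s => s)
  have hperm : (PySem.List.sorted szs (fun s => s) false).Perm szs :=
    PySem.List.sorted_perm szs (fun s => s) false
  rw [sorted2_eq_sorted_lex]
  apply PySem.List.sorted_eq_of_perm_of_pairwise_lt
  · have hnd1 : (groupRuns (PySem.List.sorted szs (fun s => s) false)).Nodup :=
      List.Pairwise.imp (fun {a b} (h : a.1 < b.1) => fun he => by rw [he] at h; exact lt_irrefl _ h)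
        (groupRuns_pairwise_fst _ hsorted)
    have hnd2 : (PySem.Set.ofList (szs.map (fun el => (el, (PySem.List.count szs el : Int))))).Nodup :=
      PySem.Set.nodup_ofList _
    refine (List.perm_ext_iff_of_nodup hnd1 hnd2).mpr ?_
    intro p
    rw [mem_groupRuns _ hsorted p, PySem.Set.mem_ofList]
    constructor
    · rintro ⟨hmem, hcnt⟩
      refine List.mem_map.mpr ⟨p.1, hperm.mem_iff.mp hmem, ?_⟩
      have : PySem.List.count szs p.1 = (PySem.List.sorted szs (fun s => s) false).count p.1 := by
        simp [PySem.List.count, hperm.count_eq]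
      rw [this]
      exact Prod.ext rfl hcnt.symm
    · intro hmem
      rcases List.mem_map.mp hmem with ⟨el, hel, hpe⟩
      have h1 : p.1 = el := by rw [← hpe]
      have h2 : p.2 = (PySem.List.count szs el : Int) := by rw [← hpe]
      subst h1
      refine ⟨hperm.mem_iff.mpr hel, ?_⟩
      rw [h2]
      simp [PySem.List.count, hperm.count_eq]
  · exact List.Pairwise.imp (fun {a b} h => Prod.Lex.lt_iff.mpr (Or.inl h))
      (groupRuns_pairwise_fst _ hsorted)

-- "N control strategies, " ++ J regrouped as B builds it
theorem strcat_lemma (a J : String) :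
    a ++ " control strategies, " ++ J = a ++ " control strategies" ++ ", " ++ J := by
  simp only [String.append_assoc]
  have h : (" control strategies, " : String) ++ J = " control strategies" ++ (", " ++ J) := by
    rw [← String.append_assoc]
    congr 1
  rw [h]

theorem main_core (list_cs : List (List (String × Int))) :
    results_info list_cs = results_info_alt list_cs := by
  unfold results_info results_info_alt
  simp only []
  rw [groupRuns_eq_sorted2]
  cases hGs : groupRuns (PySem.List.sorted (list_cs.map (fun x => pyDictLen x)) (fun s => s) false) with
  | nil => simp
  | cons g G' =>
    simp only [List.map_cons, List.isEmpty_cons, Bool.false_eq_true, if_false]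
    show (g :: G').foldl
        (fun _ _ => PySem.Int.toStr (PySem.List.len list_cs) ++ " control strategies, " ++
          PySem.Str.join ", " ((g :: G').map (fun x => PySem.Int.toStr x.2 ++ " of size " ++ PySem.Int.toStr x.1)))
        (PySem.Int.toStr (PySem.List.len list_cs) ++ " control strategies") = _
    rw [foldl_const _ _ _ (List.cons_ne_nil g G')]
    simp only [List.map_cons]
    exact strcat_lemma _ _

-- ===== VERDICT (by name: the statement is the Claim_ definition above) =====
theorem results_info_spec : Claim_equal_results_info :=
  fun list_cs _ => main_core list_cs
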